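-- pv_equiv track=rewrite | github.com/swtaktak/PS_Archive | BOJ 풀이/16722.py | is_hap
-- ===== SOURCE A (Python) =====
-- def is_hap(cur_pick):
--     card1 = cur_pick[0]
--     card2 = cur_pick[1]
--     card3 = cur_pick[2]
--     hap_flag = True
--     # 속성 판정
--     for i in range(0, 3):
--         if card1[i] == card2[i]:
--             if card1[i] != card3[i]:
--                 hap_flag = False
--         else:
--             if card1[i] == card3[i] or card2[i] == card3[i]:
--                 hap_flag = False
--     return hap_flag
-- ===== SOURCE B (Python) =====
-- def is_hap(cur_pick):
--     # Loop over the three card PAIRS, accumulating per-attribute equal-pair counts;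
--     # a column is valid iff its count is 0 or 3 (never exactly 1, i.e. exactly two equal).
--     c0 = c1 = c2 = 0
--     for p in range(3):
--         for q in range(p + 1, 3):
--             c0 += cur_pick[p][0] == cur_pick[q][0]
--             c1 += cur_pick[p][1] == cur_pick[q][1]
--             c2 += cur_pick[p][2] == cur_pick[q][2]
--     return c0 != 1 and c1 != 1 and c2 != 1
-- ===== Notes on version B (the rewrite author's own statement) =====
-- stated objective: alternative
-- what changed: B traverses the three card PAIRS (outer loop over pairs) accumulating three per-attribute equal-pair counters and accepts iff no counter is exactly 1, instead of A's per-attribute loop with nested pairwise-equality branches on a boolean flag.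
import Mathlib
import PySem

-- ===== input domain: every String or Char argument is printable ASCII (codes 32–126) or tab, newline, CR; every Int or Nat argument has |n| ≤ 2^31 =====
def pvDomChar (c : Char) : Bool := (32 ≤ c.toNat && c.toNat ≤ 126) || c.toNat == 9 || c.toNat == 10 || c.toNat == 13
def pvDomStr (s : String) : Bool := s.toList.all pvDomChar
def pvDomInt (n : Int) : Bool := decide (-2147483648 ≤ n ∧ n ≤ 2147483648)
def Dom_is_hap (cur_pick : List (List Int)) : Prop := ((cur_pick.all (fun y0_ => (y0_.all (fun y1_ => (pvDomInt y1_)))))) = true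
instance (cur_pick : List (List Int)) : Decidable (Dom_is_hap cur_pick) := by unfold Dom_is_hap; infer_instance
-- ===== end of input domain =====

-- B loops over the three card pairs accumulating per-attribute equal-pair counters (accept iff no counter is exactly 1), instead of A's per-attribute pairwise branching on a flag.


-- ===== PORT A =====
def is_hap (cur_pick : List (List Int)) : Bool :=
  let card1 := (PySem.List.pyGet? cur_pick 0).getD []
  let card2 := (PySem.List.pyGet? cur_pick 1).getD []
  let card3 := (PySem.List.pyGet? cur_pick 2).getD []
  (PySem.List.pyRange 0 3 1).foldl (fun hap_flag i =>
    let x1 := (PySem.List.pyGet? card1 i).getD 0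
    let x2 := (PySem.List.pyGet? card2 i).getD 0
    let x3 := (PySem.List.pyGet? card3 i).getD 0
    if x1 == x2 then
      if x1 != x3 then false else hap_flag
    else
      if x1 == x3 || x2 == x3 then false else hap_flag) true

-- ===== PORT B =====
-- Source B's bool addition 'c += (x == y)' is ported as '+ (if x == y then 1 else 0)'.
def is_hap_alt (cur_pick : List (List Int)) : Bool :=
  let get (p i : Int) : Int :=
    (PySem.List.pyGet? ((PySem.List.pyGet? cur_pick p).getD []) i).getD 0
  let cs : Int × Int × Int :=
    (PySem.List.pyRange 0 3 1).foldl (fun cs p =>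
      (PySem.List.pyRange (p + 1) 3 1).foldl (fun cs q =>
        (cs.1 + (if get p 0 == get q 0 then 1 else 0),
         cs.2.1 + (if get p 1 == get q 1 then 1 else 0),
         cs.2.2 + (if get p 2 == get q 2 then 1 else 0))) cs) (0, 0, 0)
  cs.1 != 1 && cs.2.1 != 1 && cs.2.2 != 1

-- ===== PRECONDITION & SPEC =====
-- Pre_ excludes only inputs on which A raises IndexError (fewer than 3 cards, or one of
-- the first three cards with fewer than 3 attributes); B raises there too.
def Pre_is_hap (cur_pick : List (List Int)) : Prop :=
  3 ≤ cur_pick.length ∧ ∀ c ∈ cur_pick.take 3, 3 ≤ c.length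
instance (cur_pick : List (List Int)) : Decidable (Pre_is_hap cur_pick) := by
  unfold Pre_is_hap; infer_instance
def pvWitness_is_hap : List (List Int) := [[0, 1, 2], [1, 1, 0], [2, 1, 1]]
def Spec_is_hap (cur_pick : List (List Int)) (out : Bool) : Prop := out = is_hap_alt cur_pick
instance (cur_pick : List (List Int)) (out : Bool) : Decidable (Spec_is_hap cur_pick out) := by unfold Spec_is_hap; infer_instance

-- ===== CLAIM (what is proved, stated in full; the proofs are below) =====
def Claim_equal_is_hap : Prop := ∀ (cur_pick : List (List Int)), Dom_is_hap cur_pick → Pre_is_hap cur_pick → Spec_is_hap cur_pick (is_hap cur_pick)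

-- ===== LEMMAS AND PROOFS =====

-- one attribute: A's branch applied to a running flag equals
-- 'flag && (equal-pair count of the column ≠ 1)'
lemma attr_step (flag : Bool) (a b c : Int) :
    (if a == b then (if a != c then false else flag)
     else (if a == c || b == c then false else flag))
    = (flag && (((if a == b then (1:Int) else 0) + (if a == c then 1 else 0) +
                 (if b == c then 1 else 0)) != 1)) := by
  by_cases hab : a = b <;> by_cases hac : a = c <;> by_cases hbc : b = c <;>
    simp_all

theorem is_hap_spec : Claim_equal_is_hap := by
  intro cur_pick _ _
  show is_hap _ = is_hap_alt _
  unfold is_hap is_hap_alt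
  have h0 : PySem.List.pyRange 0 3 1 = [0, 1, 2] := by decide
  have h1 : PySem.List.pyRange (0 + 1) 3 1 = [1, 2] := by decide
  have h2 : PySem.List.pyRange (1 + 1) 3 1 = [2] := by decide
  have h3 : PySem.List.pyRange (2 + 1) 3 1 = [] := by decide
  simp only [h0, h1, h2, h3, List.foldl]
  simp only [attr_step, Bool.true_and, zero_add, Bool.and_assoc]
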